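-- pv_equiv track=rewrite | github.com/levi218/ISDetection | src/incoherencedetector/incoherence_detector.py | cluster_paragraph_matrix
-- ===== SOURCE A (Python) =====
-- def cluster_paragraph_matrix(number_elements, edges):
--     elements = [[i] for i in range(number_elements)]
--
--     def find(i):
--         for arr in elements:
--             if i in arr:
--                 return arr
--         return None
--
--     def union(set1, set2):
--         new_set = [*set1, *set2]
--         elements.remove(set1)
--         elements.remove(set2)
--         elements.append(new_set)
--
--     for edge in edges:
--         if find(edge[0]) != find(edge[1]):
--             union(find(edge[0]), find(edge[1]))
--
--     return elements
-- ===== SOURCE B (Python) =====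
-- def cluster_paragraph_matrix(number_elements, edges):
--     # DSU via dicts: owner maps element -> set id, sets is an insertion-ordered
--     # dict of set id -> members; del + reinsert reproduces A's remove/append order.
--     owner = {}
--     sets = {}
--     for i in range(number_elements):
--         owner[i] = i
--         sets[i] = [i]
--     next_id = number_elements
--     for edge in edges:
--         ra = owner.get(edge[0])
--         rb = owner.get(edge[1])
--         if ra is None or rb is None or ra == rb:
--             continue
--         merged = sets[ra] + sets[rb]
--         del sets[ra]
--         del sets[rb]
--         sets[next_id] = merged
--         for x in merged:
--             owner[x] = next_id
--         next_id += 1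
--     return list(sets.values())
-- ===== Notes on version B (the rewrite author's own statement) =====
-- stated objective: faster
-- what changed: Replaces A's linear scan of the whole partition for every edge endpoint (find = scan all sets, union = list.remove) by a DSU over two dicts: element->set-id plus an insertion-ordered dict of set-id->members whose del+reinsert reproduces A's remove/append ordering exactly.
import Mathlib
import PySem

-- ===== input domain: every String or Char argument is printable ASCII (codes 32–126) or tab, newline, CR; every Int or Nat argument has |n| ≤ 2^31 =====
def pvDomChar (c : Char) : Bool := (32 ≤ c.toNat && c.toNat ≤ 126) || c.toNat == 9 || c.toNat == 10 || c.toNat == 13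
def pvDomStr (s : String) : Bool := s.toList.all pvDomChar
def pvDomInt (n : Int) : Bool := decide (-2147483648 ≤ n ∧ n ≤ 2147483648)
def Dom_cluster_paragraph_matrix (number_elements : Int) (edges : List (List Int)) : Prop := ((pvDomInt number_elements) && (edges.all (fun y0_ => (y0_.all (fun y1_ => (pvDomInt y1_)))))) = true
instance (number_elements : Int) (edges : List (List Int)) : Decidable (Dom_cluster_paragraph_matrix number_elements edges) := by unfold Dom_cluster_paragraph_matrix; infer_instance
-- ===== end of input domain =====

-- B replaces A's per-edge scan of the whole partition by a dict-based DSU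
-- (element→set-id plus an insertion-ordered dict of sets), reproducing A's
-- output order exactly; objective: faster (asymptotically fewer scans).

-- ===== PORT A =====
-- find(i): first set in elements containing i, else None
def pvFindA (elements : List (List Int)) (i : Int) : Option (List Int) :=
  elements.find? (fun arr => arr.contains i)

-- one iteration of A's edge loop; state none = an exception was raised
-- (IndexError on edge[0]/edge[1], or the TypeError from union(…, None))
def pvStepA (st : Option (List (List Int))) (edge : List Int) : Option (List (List Int)) :=
  match st with
  | none => none
  | some elements =>
    match PySem.List.pyGet? edge 0, PySem.List.pyGet? edge 1 with
    | some a, some b =>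
      if pvFindA elements a ≠ pvFindA elements b then
        match pvFindA elements a, pvFindA elements b with
        | some s1, some s2 =>
          match PySem.List.remove? elements s1 with
          | some el1 =>
            match PySem.List.remove? el1 s2 with
            | some el2 => some (el2 ++ [s1 ++ s2])
            | none => none
          | none => none
        | _, _ => none
      else some elements
    | _, _ => none

def cluster_paragraph_matrix (number_elements : Int) (edges : List (List Int)) : List (List Int) :=
  (edges.foldl pvStepA
    (some ((PySem.List.pyRange 0 number_elements 1).map (fun i => [i])))).getD []

-- ===== PORT B =====
-- one iteration of B's edge loop over state (owner, sets, next_id);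
-- none = an exception (IndexError on edge[0]/edge[1], or KeyError on sets[·])
def pvStepB (st : Option (PySem.Dict Int Int × PySem.Dict Int (List Int) × Int))
    (edge : List Int) : Option (PySem.Dict Int Int × PySem.Dict Int (List Int) × Int) :=
  match st with
  | none => none
  | some (owner, sets, nid) =>
    match PySem.List.pyGet? edge 0, PySem.List.pyGet? edge 1 with
    | some a, some b =>
      match owner.get? a, owner.get? b with
      | some ra, some rb =>
        if ra = rb then some (owner, sets, nid)
        else
          match sets.get? ra, sets.get? rb with
          | some s1, some s2 =>
            let merged := s1 ++ s2
            some (merged.foldl (fun d x => d.insert x nid) owner,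
                  ((sets.erase ra).erase rb).insert nid merged,
                  nid + 1)
          | _, _ => none
      | _, _ => some (owner, sets, nid)
    | _, _ => none

def cluster_paragraph_matrix_alt (number_elements : Int) (edges : List (List Int)) : List (List Int) :=
  let init := (PySem.List.pyRange 0 number_elements 1).foldl
      (fun st i => (st.1.insert i i, st.2.insert i [i]))
      ((PySem.Dict.empty : PySem.Dict Int Int), (PySem.Dict.empty : PySem.Dict Int (List Int)))
  ((edges.foldl pvStepB (some (init.1, init.2, number_elements))).map
    (fun st => st.2.1.values)).getD []

-- ===== PRECONDITION & SPEC =====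
-- Pre_ excludes exactly the inputs where A raises: an edge shorter than 2
-- (IndexError), or an edge with exactly one endpoint inside range(number_elements)
-- (find returns None for it and union unpacks None: TypeError).
def Pre_cluster_paragraph_matrix (number_elements : Int) (edges : List (List Int)) : Prop :=
  ∀ e ∈ edges, 2 ≤ e.length ∧
    (((0 ≤ PySem.List.pyGetD e 0 0 ∧ PySem.List.pyGetD e 0 0 < number_elements) ∧
      (0 ≤ PySem.List.pyGetD e 1 0 ∧ PySem.List.pyGetD e 1 0 < number_elements)) ∨
     (¬(0 ≤ PySem.List.pyGetD e 0 0 ∧ PySem.List.pyGetD e 0 0 < number_elements) ∧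
      ¬(0 ≤ PySem.List.pyGetD e 1 0 ∧ PySem.List.pyGetD e 1 0 < number_elements)))
instance (number_elements : Int) (edges : List (List Int)) : Decidable (Pre_cluster_paragraph_matrix number_elements edges) := by unfold Pre_cluster_paragraph_matrix; infer_instance

def pvWitness_cluster_paragraph_matrix : Int × List (List Int) :=
  (4, [[0, 1], [2, 3], [1, 3], [7, 9]])

def Spec_cluster_paragraph_matrix (number_elements : Int) (edges : List (List Int)) (out : List (List Int)) : Prop := out = cluster_paragraph_matrix_alt number_elements edges
instance (number_elements : Int) (edges : List (List Int)) (out : List (List Int)) : Decidable (Spec_cluster_paragraph_matrix number_elements edges out) := by unfold Spec_cluster_paragraph_matrix; infer_instance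

-- ===== CLAIM (what is proved, stated in full; the proofs are below) =====
def Claim_equal_cluster_paragraph_matrix : Prop := ∀ (number_elements : Int) (edges : List (List Int)), Dom_cluster_paragraph_matrix number_elements edges → Pre_cluster_paragraph_matrix number_elements edges → Spec_cluster_paragraph_matrix number_elements edges (cluster_paragraph_matrix number_elements edges)


-- ===== LEMMAS AND PROOFS =====

-- general helpers about PySem primitives as used by the two ports

theorem pv_remove?_of_mem {l : List (List Int)} {a : List Int} (h : a ∈ l) :
    PySem.List.remove? l a = some (l.erase a) := by
  simp only [PySem.List.remove?, List.erase_eq_eraseIdx]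
  rcases h' : List.idxOf? a l with _ | i
  · rw [List.idxOf?_eq_none_iff] at h'; exact absurd h h'
  · simp

theorem pv_find?_filter {α : Type} (p q : α → Bool) (l : List α) :
    (l.filter q).find? p = l.find? (fun x => q x && p x) := by
  induction l with
  | nil => rfl
  | cons x t ih => by_cases hq : q x <;> by_cases hp : p x <;> simp [List.filter, List.find?, hq, hp, ih]

theorem pv_get?_erase {ν : Type} (d : PySem.Dict Int ν) (k k' : Int) :
    (d.erase k).get? k' = if k' = k then none else d.get? k' := by
  simp only [PySem.Dict.get?, PySem.Dict.erase, pv_find?_filter]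
  split
  · rename_i hk; subst hk
    have : (fun (x : Int × ν) => (!x.1 == k') && (x.1 == k')) = fun _ => false := by
      funext x; by_cases h : x.1 == k' <;> simp [h]
    rw [this]; simp
  · rename_i hk
    have : (fun (x : Int × ν) => (!x.1 == k) && (x.1 == k')) = fun x => x.1 == k' := by
      funext x; by_cases h : x.1 = k' <;> simp [h, hk]
    rw [this]

theorem pv_mem_values_of_get? {ν : Type} {d : PySem.Dict Int ν} {k : Int} {v : ν}
    (h : d.get? k = some v) : v ∈ d.values := by
  simp only [PySem.Dict.get?, Option.map_eq_some_iff] at h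
  obtain ⟨p, hp, hv⟩ := h
  exact hv ▸ List.mem_map_of_mem (List.mem_of_find?_eq_some hp)

theorem pv_mem_keys_of_get? {ν : Type} {d : PySem.Dict Int ν} {k : Int} {v : ν}
    (h : d.get? k = some v) : k ∈ d.keys := by
  simp only [PySem.Dict.get?, Option.map_eq_some_iff] at h
  obtain ⟨p, hp, hv⟩ := h
  have h1 := List.find?_some hp
  have h2 := List.mem_of_find?_eq_some hp
  simp only [beq_iff_eq] at h1
  exact h1 ▸ List.mem_map_of_mem h2

theorem pv_values_erase {ν : Type} [BEq ν] [LawfulBEq ν] (d : PySem.Dict Int ν)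
    (hk : d.keys.Nodup) (hv : d.values.Nodup) {ra : Int} {s : ν}
    (h : d.get? ra = some s) : (d.erase ra).values = d.values.erase s := by
  obtain ⟨l⟩ := d
  induction l with
  | nil => simp [PySem.Dict.get?] at h
  | cons p t ih =>
    obtain ⟨k, v⟩ := p
    simp only [PySem.Dict.keys, PySem.Dict.values, List.map_cons, List.nodup_cons] at hk hv
    by_cases hkra : k = ra
    · subst hkra
      have hvs : v = s := by
        simp [PySem.Dict.get?, List.find?] at h; exact h
      subst hvs
      have hfilter : t.filter (fun p => !p.1 == k) = t := by
        rw [List.filter_eq_self]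
        intro x hx
        simp only [Bool.not_eq_eq_eq_not, Bool.not_true, beq_eq_false_iff_ne, ne_eq]
        intro hxk; exact hk.1 (hxk ▸ List.mem_map_of_mem hx)
      simp [PySem.Dict.erase, PySem.Dict.values, List.filter, hfilter]
    · have hget : (PySem.Dict.mk t).get? ra = some s := by
        simp only [PySem.Dict.get?, List.find?] at h ⊢
        rw [show ((k, v).1 == ra) = false by simpa using hkra] at h
        exact h
      have hsv : s ∈ (PySem.Dict.mk t).values := pv_mem_values_of_get? hget
      have hvs : v ≠ s := fun hvs => hv.1 (hvs ▸ hsv)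
      have ihr := ih hk.2 hv.2 hget
      simp only [PySem.Dict.erase, PySem.Dict.values, List.filter] at ihr ⊢
      rw [show (!(k, v).1 == ra) = true by simpa using hkra]
      simp only [List.map_cons]
      rw [List.erase_cons_tail (by simpa using hvs)]
      exact congrArg (v :: ·) ihr

theorem pv_keys_erase_sublist {ν : Type} (d : PySem.Dict Int ν) (k : Int) :
    ((d.erase k).keys).Sublist d.keys :=
  List.Sublist.map _ List.filter_sublist

theorem pv_contains_false_of_not_mem {ν : Type} {d : PySem.Dict Int ν} {k : Int}
    (h : k ∉ d.keys) : d.contains k = false := by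
  by_cases hc : d.contains k
  · exact absurd ((PySem.Dict.contains_iff_mem_keys d k).mp hc) h
  · simpa using hc

theorem pv_get?_foldl_insert_const (l : List Int) (v : Int) (d : PySem.Dict Int Int) (x : Int) :
    (l.foldl (fun d y => d.insert y v) d).get? x = if x ∈ l then some v else d.get? x := by
  induction l generalizing d with
  | nil => simp
  | cons y t ih =>
    simp only [List.foldl_cons, ih, PySem.Dict.get?_insert, List.mem_cons]
    by_cases hxt : x ∈ t <;> by_cases hxy : x = y <;> simp [hxt, hxy]

-- find: on a pairwise-disjoint partition the first set containing x is the unique one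
theorem pv_find_first {elems : List (List Int)}
    (hd : List.Pairwise (fun s t => ∀ x, x ∈ s → x ∉ t) elems)
    {s : List Int} (hs : s ∈ elems) {x : Int} (hx : x ∈ s) :
    pvFindA elems x = some s := by
  induction elems with
  | nil => cases hs
  | cons t rest ih =>
    rcases List.pairwise_cons.mp hd with ⟨hdisj, hrest⟩
    rcases List.mem_cons.mp hs with hs | hs
    · subst hs
      simp [pvFindA, List.find?, hx]
    · have hxt : x ∉ t := fun hxt => hdisj s hs x hxt hx
      simpa [pvFindA, List.find?, hxt] using ih hrest hs

theorem pv_find_none {elems : List (List Int)} {x : Int}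
    (h : ∀ s ∈ elems, x ∉ s) : pvFindA elems x = none := by
  simp only [pvFindA, List.find?_eq_none]
  intro s hs
  simpa using h s hs

theorem pv_nodup_elems {elems : List (List Int)}
    (hd : List.Pairwise (fun s t => ∀ x, x ∈ s → x ∉ t) elems)
    (hne : ∀ s ∈ elems, s ≠ []) : elems.Nodup := by
  refine List.Pairwise.imp_of_mem ?_ hd
  intro a b ha _ hab heq
  obtain ⟨x, hx⟩ := List.exists_mem_of_ne_nil a (hne a ha)
  exact hab x hx (heq ▸ hx)

-- the simulation invariant between A's state (elems) and B's state (owner, sets, nid)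
def pvRel (n : Int) (elems : List (List Int)) (owner : PySem.Dict Int Int)
    (sets : PySem.Dict Int (List Int)) (nid : Int) : Prop :=
  sets.values = elems ∧
  sets.keys.Nodup ∧
  (∀ k ∈ sets.keys, k < nid) ∧
  (∀ x r, owner.get? x = some r → ∃ s, sets.get? r = some s ∧ x ∈ s) ∧
  (∀ x, owner.get? x = none → ∀ s ∈ elems, x ∉ s) ∧
  List.Pairwise (fun s t => ∀ x, x ∈ s → x ∉ t) elems ∧
  (∀ s ∈ elems, s ≠ []) ∧
  (∀ x : Int, (∃ s ∈ elems, x ∈ s) ↔ (0 ≤ x ∧ x < n))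

theorem pv_pyGet0 {e : List Int} (h : 2 ≤ e.length) :
    PySem.List.pyGet? e 0 = some (PySem.List.pyGetD e 0 0) := by
  rcases e with _|⟨x,_|⟨y,t⟩⟩
  · simp at h
  · simp at h
  · simp [PySem.List.pyGet?, PySem.List.pyGetD, PySem.List.pyIdx?]
    rw [if_pos (by omega : (0:Int) ≤ ↑t.length + 1)]
    simp

theorem pv_pyGet1 {e : List Int} (h : 2 ≤ e.length) :
    PySem.List.pyGet? e 1 = some (PySem.List.pyGetD e 1 0) := by
  rcases e with _|⟨x,_|⟨y,t⟩⟩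
  · simp at h
  · simp at h
  · simp [PySem.List.pyGet?, PySem.List.pyGetD, PySem.List.pyIdx?]

theorem pv_step_sim (n : Int) (e : List Int) (elems : List (List Int))
    (owner : PySem.Dict Int Int) (sets : PySem.Dict Int (List Int)) (nid : Int)
    (hrel : pvRel n elems owner sets nid)
    (hlen : 2 ≤ e.length)
    (hpre : ((0 ≤ PySem.List.pyGetD e 0 0 ∧ PySem.List.pyGetD e 0 0 < n) ∧
             (0 ≤ PySem.List.pyGetD e 1 0 ∧ PySem.List.pyGetD e 1 0 < n)) ∨
            (¬(0 ≤ PySem.List.pyGetD e 0 0 ∧ PySem.List.pyGetD e 0 0 < n) ∧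
             ¬(0 ≤ PySem.List.pyGetD e 1 0 ∧ PySem.List.pyGetD e 1 0 < n))) :
    ∃ elems' owner' sets' nid',
      pvStepA (some elems) e = some elems' ∧
      pvStepB (some (owner, sets, nid)) e = some (owner', sets', nid') ∧
      pvRel n elems' owner' sets' nid' := by
  obtain ⟨hv, hknd, hkb, ho, hn, hd, hne, hr⟩ := hrel
  have hget0 := pv_pyGet0 hlen
  have hget1 := pv_pyGet1 hlen
  set a := PySem.List.pyGetD e 0 0 with ha_def
  set b := PySem.List.pyGetD e 1 0 with hb_def
  rcases hpre with ⟨hina, hinb⟩ | ⟨houta, houtb⟩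
  · -- both endpoints in range
    have hoa : ∃ ra, owner.get? a = some ra := by
      cases hox : owner.get? a with
      | none =>
        exfalso
        obtain ⟨s, hs, hxs⟩ := (hr a).mpr hina
        exact hn a hox s hs hxs
      | some ra => exact ⟨ra, rfl⟩
    have hob : ∃ rb, owner.get? b = some rb := by
      cases hox : owner.get? b with
      | none =>
        exfalso
        obtain ⟨s, hs, hxs⟩ := (hr b).mpr hinb
        exact hn b hox s hs hxs
      | some rb => exact ⟨rb, rfl⟩
    obtain ⟨ra, hra⟩ := hoa
    obtain ⟨rb, hrb⟩ := hob
    obtain ⟨s1, hs1, has1⟩ := ho a ra hra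
    obtain ⟨s2, hs2, hbs2⟩ := ho b rb hrb
    have hs1mem : s1 ∈ elems := hv ▸ pv_mem_values_of_get? hs1
    have hs2mem : s2 ∈ elems := hv ▸ pv_mem_values_of_get? hs2
    have hfind1 : pvFindA elems a = some s1 := pv_find_first hd hs1mem has1
    have hfind2 : pvFindA elems b = some s2 := pv_find_first hd hs2mem hbs2
    have hnodup : elems.Nodup := pv_nodup_elems hd hne
    by_cases hrab : ra = rb
    · -- same representative: both sides skip
      subst hrab
      have hs12 : s1 = s2 := by rw [hs1] at hs2; exact Option.some.inj hs2
      subst hs12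
      refine ⟨elems, owner, sets, nid, ?_, ?_, hv, hknd, hkb, ho, hn, hd, hne, hr⟩
      · simp [pvStepA, hget0, hget1, hfind1, hfind2]
      · simp [pvStepB, hget0, hget1, hra, hrb]
    · -- distinct representatives: both sides merge
      have hvnd : sets.values.Nodup := hv ▸ hnodup
      have hs12 : s1 ≠ s2 := by
        intro hseq
        subst hseq
        have h1 := (PySem.Dict.get?_eq_some_iff_mem_items sets ra s1 hknd).mp hs1
        have h2 := (PySem.Dict.get?_eq_some_iff_mem_items sets rb s1 hknd).mp hs2
        have := List.inj_on_of_nodup_map (f := Prod.snd) hvnd h1 h2 rfl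
        exact hrab (congrArg Prod.fst this)
      have hs2e1 : s2 ∈ elems.erase s1 := (List.Nodup.mem_erase_iff hnodup).mpr ⟨Ne.symm hs12, hs2mem⟩
      have hrm1 : PySem.List.remove? elems s1 = some (elems.erase s1) := pv_remove?_of_mem hs1mem
      have hrm2 : PySem.List.remove? (elems.erase s1) s2 = some ((elems.erase s1).erase s2) :=
        pv_remove?_of_mem hs2e1
      -- the new states
      refine ⟨(elems.erase s1).erase s2 ++ [s1 ++ s2],
              (s1 ++ s2).foldl (fun d x => d.insert x nid) owner,
              (((sets.erase ra).erase rb).insert nid (s1 ++ s2)),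
              nid + 1, ?_, ?_, ?_⟩
      · simp only [pvStepA, hget0, hget1, hfind1, hfind2, hrm1, hrm2]
        rw [if_pos (by simp [hs12])]
      · simp [pvStepB, hget0, hget1, hra, hrb, hrab, hs1, hs2]
      · -- re-establish the invariant
        have hv1 : (sets.erase ra).values = elems.erase s1 := by
          rw [pv_values_erase sets hknd hvnd hs1, hv]

        have hk1nd : (sets.erase ra).keys.Nodup := hknd.sublist (pv_keys_erase_sublist sets ra)
        have hget2' : (sets.erase ra).get? rb = some s2 := by
          rw [pv_get?_erase]
          simp [Ne.symm hrab, hs2]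
        have hv1nd : (sets.erase ra).values.Nodup := hv1 ▸ hnodup.erase s1
        have hv2 : ((sets.erase ra).erase rb).values = (elems.erase s1).erase s2 := by
          rw [pv_values_erase _ hk1nd hv1nd hget2', hv1]

        have hk2nd : ((sets.erase ra).erase rb).keys.Nodup :=
          hk1nd.sublist (pv_keys_erase_sublist _ rb)
        have hkeysub : ∀ k ∈ ((sets.erase ra).erase rb).keys, k ∈ sets.keys := fun k hk =>
          (pv_keys_erase_sublist sets ra).mem ((pv_keys_erase_sublist _ rb).mem hk)
        have hnidfree : nid ∉ ((sets.erase ra).erase rb).keys := fun hmem =>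
          absurd (hkb nid (hkeysub nid hmem)) (lt_irrefl nid)
        have hitems' : (((sets.erase ra).erase rb).insert nid (s1 ++ s2)).items =
            ((sets.erase ra).erase rb).items ++ [(nid, s1 ++ s2)] :=
          PySem.Dict.items_insert_of_not_contains _ _ (pv_contains_false_of_not_mem hnidfree)
        have hv' : (((sets.erase ra).erase rb).insert nid (s1 ++ s2)).values =
            (elems.erase s1).erase s2 ++ [s1 ++ s2] := by
          simp only [PySem.Dict.values, hitems', List.map_append, List.map_cons, List.map_nil]
          rw [← PySem.Dict.values, hv2]
        have hkeys' : (((sets.erase ra).erase rb).insert nid (s1 ++ s2)).keys =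
            ((sets.erase ra).erase rb).keys ++ [nid] := by
          simp only [PySem.Dict.keys, hitems', List.map_append, List.map_cons, List.map_nil]
        have hsub2 : ((elems.erase s1).erase s2).Sublist elems :=
          (List.erase_sublist).trans List.erase_sublist
        have hsymm : Symmetric (fun s t : List Int => ∀ x, x ∈ s → x ∉ t) := by
          intro s t h x hxt hxs
          exact h x hxs hxt
        have hall := List.Pairwise.forall hsymm hd
        have hmem2 : ∀ t ∈ (elems.erase s1).erase s2, t ∈ elems ∧ t ≠ s1 ∧ t ≠ s2 := by
          intro t ht
          have h2 := (List.Nodup.mem_erase_iff (hnodup.erase s1)).mp ht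
          have h1 := (List.Nodup.mem_erase_iff hnodup).mp h2.2
          exact ⟨h1.2, h1.1, h2.1⟩
        refine ⟨hv', ?_, ?_, ?_, ?_, ?_, ?_, ?_⟩
        · -- keys nodup
          rw [hkeys']
          simp only [List.nodup_append, hk2nd, List.nodup_cons, List.not_mem_nil,
            not_false_eq_true, List.nodup_nil, and_true, true_and]
          intro k hk x hx
          simp only [List.mem_singleton] at hx
          subst hx
          intro hkeq
          subst hkeq
          exact hnidfree hk
        · -- keys bound
          intro k hk
          rw [hkeys'] at hk
          rcases List.mem_append.mp hk with hk | hk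
          · exact lt_trans (hkb k (hkeysub k hk)) (by omega)
          · simp at hk
            omega
        · -- owner consistency
          intro x0 r0 h0
          rw [pv_get?_foldl_insert_const] at h0
          by_cases hxm : x0 ∈ s1 ++ s2
          · rw [if_pos hxm] at h0
            refine ⟨s1 ++ s2, ?_, hxm⟩
            rw [← Option.some.inj h0]
            exact PySem.Dict.get?_insert_self _ _ _
          · rw [if_neg hxm] at h0
            obtain ⟨s, hs, hxs⟩ := ho x0 r0 h0
            have hr0a : r0 ≠ ra := by
              intro hq
              subst hq
              rw [hs1] at hs
              exact hxm (List.mem_append_left _ (Option.some.inj hs ▸ hxs))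
            have hr0b : r0 ≠ rb := by
              intro hq
              subst hq
              rw [hs2] at hs
              exact hxm (List.mem_append_right _ (Option.some.inj hs ▸ hxs))
            have hr0nid : r0 ≠ nid := by
              have := hkb r0 (pv_mem_keys_of_get? hs)
              omega
            refine ⟨s, ?_, hxs⟩
            rw [PySem.Dict.get?_insert]
            rw [if_neg hr0nid, pv_get?_erase, if_neg hr0b, pv_get?_erase, if_neg hr0a]
            exact hs
        · -- owner-none consistency
          intro x0 h0
          rw [pv_get?_foldl_insert_const] at h0
          by_cases hxm : x0 ∈ s1 ++ s2
          · rw [if_pos hxm] at h0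
            cases h0
          · rw [if_neg hxm] at h0
            intro s hs hxs
            rcases List.mem_append.mp hs with hs | hs
            · exact hn x0 h0 s ((hmem2 s hs).1) hxs
            · simp at hs
              exact hxm (hs ▸ hxs)
        · -- pairwise disjoint
          rw [List.pairwise_append]
          refine ⟨hd.sublist hsub2, by simp, ?_⟩
          intro t ht m hm
          have hm' : m = s1 ++ s2 := by simpa using hm
          subst hm'
          obtain ⟨htmem, hts1, hts2⟩ := hmem2 t ht
          intro x hxt hxm
          rcases List.mem_append.mp hxm with hx | hx
          · exact hall htmem hs1mem hts1 x hxt hx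
          · exact hall htmem hs2mem hts2 x hxt hx
        · -- nonempty
          intro s hs
          rcases List.mem_append.mp hs with hs | hs
          · exact hne s ((hmem2 s hs).1)
          · simp at hs
            subst hs
            simp [hne s1 hs1mem]
        · -- same universe of elements
          intro x0
          rw [← hr x0]
          constructor
          · rintro ⟨s, hs, hxs⟩
            rcases List.mem_append.mp hs with hs | hs
            · exact ⟨s, (hmem2 s hs).1, hxs⟩
            · simp at hs
              subst hs
              rcases List.mem_append.mp hxs with hx | hx
              · exact ⟨s1, hs1mem, hx⟩
              · exact ⟨s2, hs2mem, hx⟩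
          · rintro ⟨s, hs, hxs⟩
            by_cases h1 : s = s1
            · exact ⟨s1 ++ s2, List.mem_append_right _ (by simp), List.mem_append_left _ (h1 ▸ hxs)⟩
            · by_cases h2 : s = s2
              · exact ⟨s1 ++ s2, List.mem_append_right _ (by simp), List.mem_append_right _ (h2 ▸ hxs)⟩
              · refine ⟨s, List.mem_append_left _ ?_, hxs⟩
                exact (List.Nodup.mem_erase_iff (hnodup.erase s1)).mpr
                  ⟨h2, (List.Nodup.mem_erase_iff hnodup).mpr ⟨h1, hs⟩⟩
  · -- both endpoints out of range: both sides skip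
    have hfa : pvFindA elems a = none :=
      pv_find_none (fun s hs hxs => houta ((hr a).mp ⟨s, hs, hxs⟩))
    have hfb : pvFindA elems b = none :=
      pv_find_none (fun s hs hxs => houtb ((hr b).mp ⟨s, hs, hxs⟩))
    have hoa : owner.get? a = none := by
      cases hox : owner.get? a with
      | none => rfl
      | some ra =>
        exfalso
        obtain ⟨s, hs, hxs⟩ := ho a ra hox
        exact houta ((hr a).mp ⟨s, hv ▸ pv_mem_values_of_get? hs, hxs⟩)
    refine ⟨elems, owner, sets, nid, ?_, ?_, hv, hknd, hkb, ho, hn, hd, hne, hr⟩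
    · simp [pvStepA, hget0, hget1, hfa, hfb]
    · simp [pvStepB, hget0, hget1, hoa]

theorem pv_fold_sim (n : Int) (edges : List (List Int)) (elems : List (List Int))
    (owner : PySem.Dict Int Int) (sets : PySem.Dict Int (List Int)) (nid : Int)
    (hrel : pvRel n elems owner sets nid)
    (hpre : Pre_cluster_paragraph_matrix n edges) :
    ∃ elems' owner' sets' nid',
      edges.foldl pvStepA (some elems) = some elems' ∧
      edges.foldl pvStepB (some (owner, sets, nid)) = some (owner', sets', nid') ∧
      pvRel n elems' owner' sets' nid' := by
  induction edges generalizing elems owner sets nid with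
  | nil => exact ⟨elems, owner, sets, nid, rfl, rfl, hrel⟩
  | cons e rest ih =>
    have hpe := hpre e (List.mem_cons_self)
    obtain ⟨elems1, o1, s1, n1, hA, hB, hrel1⟩ :=
      pv_step_sim n e elems owner sets nid hrel hpe.1 hpe.2
    obtain ⟨elems', o', s', n', hA', hB', hrel'⟩ :=
      ih elems1 o1 s1 n1 hrel1 (fun e' he' => hpre e' (List.mem_cons_of_mem _ he'))
    refine ⟨elems', o', s', n', ?_, ?_, hrel'⟩
    · simpa [List.foldl_cons, hA] using hA'
    · simpa [List.foldl_cons, hB] using hB'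

theorem pv_init_rel (n : Int) :
    pvRel n ((PySem.List.pyRange 0 n 1).map (fun i => [i]))
      ((PySem.List.pyRange 0 n 1).foldl (fun d i => d.insert i i) PySem.Dict.empty)
      ((PySem.List.pyRange 0 n 1).foldl (fun d i => d.insert i [i]) PySem.Dict.empty)
      n := by
  have hcon : ∀ (ν : Type) (v : Int → ν) x, (PySem.Dict.empty : PySem.Dict Int ν).contains x = false := by
    intro ν v x
    rfl
  have hnd : (PySem.List.pyRange 0 n 1).Nodup := PySem.List.nodup_pyRange_one 0 n
  have hmem : ∀ x : Int, x ∈ PySem.List.pyRange 0 n 1 ↔ 0 ≤ x ∧ x < n := by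
    intro x
    exact PySem.List.mem_pyRange_one
  have hio : ((PySem.List.pyRange 0 n 1).foldl (fun d i => d.insert i i) PySem.Dict.empty).items =
      (PySem.List.pyRange 0 n 1).map (fun i => (i, i)) := by
    rw [PySem.Dict.items_foldl_insert_fresh _ (fun i => i) (fun i => i) _ (fun x _ => hcon _ (fun i => i) x) (by simpa using hnd)]
    rfl
  have his : ((PySem.List.pyRange 0 n 1).foldl (fun d i => d.insert i [i]) PySem.Dict.empty).items =
      (PySem.List.pyRange 0 n 1).map (fun i => (i, [i])) := by
    rw [PySem.Dict.items_foldl_insert_fresh _ (fun i => i) (fun i => ([i] : List Int)) _ (fun x _ => hcon _ (fun i => ([i] : List Int)) x) (by simpa using hnd)]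
    rfl
  have hks : ((PySem.List.pyRange 0 n 1).foldl (fun d i => d.insert i [i]) PySem.Dict.empty).keys =
      PySem.List.pyRange 0 n 1 := by
    simp only [PySem.Dict.keys, his, List.map_map]
    exact List.map_id _
  have hko : ((PySem.List.pyRange 0 n 1).foldl (fun d i => d.insert i i) PySem.Dict.empty).keys =
      PySem.List.pyRange 0 n 1 := by
    simp only [PySem.Dict.keys, hio, List.map_map]
    exact List.map_id _
  refine ⟨?_, ?_, ?_, ?_, ?_, ?_, ?_, ?_⟩
  · simp [PySem.Dict.values, his, List.map_map, Function.comp]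
  · rw [hks]
    exact hnd
  · intro k hk
    rw [hks] at hk
    exact ((hmem k).mp hk).2
  · intro x r h0
    have hkeys : ((PySem.List.pyRange 0 n 1).foldl (fun d i => d.insert i i) PySem.Dict.empty).keys.Nodup := by
      rw [hko]; exact hnd
    have hmemit := (PySem.Dict.get?_eq_some_iff_mem_items _ x r hkeys).mp h0
    rw [hio] at hmemit
    obtain ⟨i, hi, hpair⟩ := List.mem_map.mp hmemit
    have hx : x = i := (congrArg Prod.fst hpair).symm
    have hrr : r = i := (congrArg Prod.snd hpair).symm
    refine ⟨[i], ?_, by rw [hx]; simp⟩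
    rw [hrr]
    have hknd : ((PySem.List.pyRange 0 n 1).foldl (fun d i => d.insert i [i]) PySem.Dict.empty).keys.Nodup := by
      rw [hks]; exact hnd
    refine (PySem.Dict.get?_eq_some_iff_mem_items _ i [i] hknd).mpr ?_
    rw [his]
    exact List.mem_map.mpr ⟨i, hi, rfl⟩
  · intro x h0 s hs hxs
    have hnm := (PySem.Dict.get?_eq_none_iff_not_mem_keys _ _).mp h0
    rw [hko] at hnm
    obtain ⟨i, hi, hsi⟩ := List.mem_map.mp hs
    subst hsi
    simp only [List.mem_singleton] at hxs
    subst hxs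
    exact hnm hi
  · rw [List.pairwise_map]
    refine List.Pairwise.imp_of_mem ?_ hnd
    intro i j _ _ hij x hxi hxj
    simp only [List.mem_singleton] at hxi hxj
    exact hij (hxi ▸ hxj ▸ rfl)
  · intro s hs
    obtain ⟨i, _, hsi⟩ := List.mem_map.mp hs
    subst hsi
    simp
  · intro x
    rw [← hmem x]
    constructor
    · rintro ⟨s, hs, hxs⟩
      obtain ⟨i, hi, hsi⟩ := List.mem_map.mp hs
      subst hsi
      simp only [List.mem_singleton] at hxs
      exact hxs ▸ hi
    · intro hx
      exact ⟨[x], List.mem_map.mpr ⟨x, hx, rfl⟩, by simp⟩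

-- ===== VERDICT (by name: the statement is the Claim_ definition above) =====
theorem cluster_paragraph_matrix_spec : Claim_equal_cluster_paragraph_matrix := by
  intro n edges _ hpre
  unfold Spec_cluster_paragraph_matrix
  obtain ⟨elems', o', s', n', hA, hB, hrel⟩ :=
    pv_fold_sim n edges ((PySem.List.pyRange 0 n 1).map (fun i => [i]))
      ((PySem.List.pyRange 0 n 1).foldl (fun d i => d.insert i i) PySem.Dict.empty)
      ((PySem.List.pyRange 0 n 1).foldl (fun d i => d.insert i [i]) PySem.Dict.empty)
      n (pv_init_rel n) hpre
  simp only [cluster_paragraph_matrix, cluster_paragraph_matrix_alt]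
  rw [PySem.List.foldl_prod_mk (f := fun (d : PySem.Dict Int Int) (i : Int) => d.insert i i)
    (g := fun (d : PySem.Dict Int (List Int)) (i : Int) => d.insert i [i])]
  rw [hA, hB]
  simp [hrel.1]
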